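-- pv_equiv track=rewrite | github.com/yooncoderhere/2025_yooncoder | 백준/Gold/14271. 그리드 게임/그리드 게임.py | simulate_life_game
-- ===== SOURCE A (Python) =====
-- from collections import deque
--
-- dRow = [-1, 0, 1, 0]
--
-- dCol = [0, 1, 0, -1]
--
-- def simulate_life_game(grid, K):
--     """ 무한한 크기의 격자에서 K초 후 살아있는 칸 개수 계산 """
--     ROW_OFFSET, COL_OFFSET = 1500, 1500
--     found = set()
--     q = deque()
--
--     # 초기 살아있는 칸을 큐에 추가
--     n, m = len(grid), len(grid[0])
--     for i in range(n):
--         for j in range(m):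
--             if grid[i][j] == 'o':  # 살아있는 칸
--                 found.add((i + ROW_OFFSET, j + COL_OFFSET))
--                 q.append((i + ROW_OFFSET, j + COL_OFFSET))
--
--     # BFS 탐색 시작
--     while K > 0 and q:
--         for _ in range(len(q)):  # 현재 depth의 모든 노드 처리
--             row, col = q.popleft()
--             for i in range(4):
--                 nextRow, nextCol = row + dRow[i], col + dCol[i]
--                 if (nextRow, nextCol) not in found:  # 방문하지 않은 곳만 추가
--                     found.add((nextRow, nextCol))
--                     q.append((nextRow, nextCol))
--         K -= 1  # 한 단계 확장 후 K 감소
--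
--     return len(found)
-- ===== SOURCE B (Python) =====
-- def simulate_life_game(grid, K):
--     """K초 후 살아있는 칸 수: 각 살아있는 칸의 맨해튼 반경-K 다이아몬드를 직접 열거해 합집합 크기를 센다 (BFS 없음)."""
--     n, m = len(grid), len(grid[0])
--     R = K if K > 0 else 0
--     covered = set()
--     for i in range(n):
--         for j in range(m):
--             if grid[i][j] == 'o':
--                 for dr in range(-R, R + 1):
--                     w = R - abs(dr)
--                     for dc in range(-w, w + 1):
--                         covered.add((i + dr, j + dc))
--     return len(covered)
-- ===== Notes on version B (the rewrite author's own statement) =====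
-- stated objective: alternative
-- what changed: Replaced the level-by-level BFS with a visited set and deque by a direct geometric enumeration: each live cell's Manhattan ball of radius max(K,0) is enumerated into one set and its size returned, with no time-step simulation, queue or neighbour expansion.
import Mathlib
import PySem

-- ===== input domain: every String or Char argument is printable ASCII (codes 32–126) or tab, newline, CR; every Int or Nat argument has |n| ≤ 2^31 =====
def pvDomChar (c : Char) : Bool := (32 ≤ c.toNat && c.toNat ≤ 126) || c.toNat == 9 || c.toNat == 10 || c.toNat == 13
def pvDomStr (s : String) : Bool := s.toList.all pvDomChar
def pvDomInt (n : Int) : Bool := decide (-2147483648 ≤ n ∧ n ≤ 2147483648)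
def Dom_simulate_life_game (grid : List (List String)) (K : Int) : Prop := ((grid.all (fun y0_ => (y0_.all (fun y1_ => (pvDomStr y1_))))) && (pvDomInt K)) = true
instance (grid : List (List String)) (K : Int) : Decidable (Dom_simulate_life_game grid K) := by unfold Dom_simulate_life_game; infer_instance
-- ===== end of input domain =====

-- B replaces A's level-by-level BFS by a direct enumeration of each live cell's Manhattan ball
-- of radius max(K,0) into one set (objective: alternative algorithm, no time-step simulation).
-- Python sets are represented by Std.HashSet (membership/insert/len only — order never consumed).

-- ===== PORT A =====
-- grid[i][j] as A reads it
def pvCell (grid : List (List String)) (i j : Int) : String :=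
  (PySem.List.pyGet? ((PySem.List.pyGet? grid i).getD []) j).getD ""

def dRow : List Int := [-1, 0, 1, 0]
def dCol : List Int := [0, 1, 0, -1]

-- body of "if (nextRow, nextCol) not in found: found.add(...); q.append(...)"
def pvAStep (st : Std.HashSet (Int × Int) × List (Int × Int)) (p : Int × Int) :
    Std.HashSet (Int × Int) × List (Int × Int) :=
  if st.1.contains p = false then (st.1.insert p, st.2 ++ [p]) else st

-- one popped node: "for i in range(4): nextRow, nextCol = row + dRow[i], col + dCol[i]; …"
def pvAProcess (st : Std.HashSet (Int × Int) × List (Int × Int)) (node : Int × Int) :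
    Std.HashSet (Int × Int) × List (Int × Int) :=
  (PySem.List.pyRange 0 4 1).foldl
    (fun st i =>
      pvAStep st (node.1 + (PySem.List.pyGet? dRow i).getD 0,
                  node.2 + (PySem.List.pyGet? dCol i).getD 0)) st

-- "while K > 0 and q:" — one round pops len(q) nodes and leaves the appended ones
def pvALoop : Nat → Std.HashSet (Int × Int) → List (Int × Int) → Std.HashSet (Int × Int)
  | 0, found, _ => found
  | fuel + 1, found, q =>
    if q = [] then found
    else
      let st := q.foldl pvAProcess (found, ([] : List (Int × Int)))
      pvALoop fuel st.1 st.2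

def simulate_life_game (grid : List (List String)) (K : Int) : Int :=
  let n : Int := grid.length
  let m : Int := (((PySem.List.pyGet? grid 0).getD []).length : Int)
  let init :=
    (PySem.List.pyRange 0 n 1).foldl
      (fun st i =>
        (PySem.List.pyRange 0 m 1).foldl
          (fun st j =>
            if pvCell grid i j = "o" then
              (st.1.insert (i + 1500, j + 1500), st.2 ++ [(i + 1500, j + 1500)])
            else st) st)
      ((Std.HashSet.emptyWithCapacity : Std.HashSet (Int × Int)), ([] : List (Int × Int)))
  ((pvALoop K.toNat init.1 init.2).size : Int)

-- ===== PORT B =====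
-- grid[i][j] as B reads it
def pvCellB (grid : List (List String)) (i j : Int) : String :=
  (PySem.List.pyGet? ((PySem.List.pyGet? grid i).getD []) j).getD ""

def simulate_life_game_alt (grid : List (List String)) (K : Int) : Int :=
  let n : Int := grid.length
  let m : Int := (((PySem.List.pyGet? grid 0).getD []).length : Int)
  let R : Int := if 0 < K then K else 0
  let covered : Std.HashSet (Int × Int) :=
    (PySem.List.pyRange 0 n 1).foldl
      (fun cov i =>
        (PySem.List.pyRange 0 m 1).foldl
          (fun cov j =>
            if pvCellB grid i j = "o" then
              (PySem.List.pyRange (-R) (R + 1) 1).foldl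
                (fun cov dr =>
                  (PySem.List.pyRange (-(R - |dr|)) ((R - |dr|) + 1) 1).foldl
                    (fun cov dc => cov.insert (i + dr, j + dc)) cov) cov
            else cov) cov)
      (Std.HashSet.emptyWithCapacity : Std.HashSet (Int × Int))
  (covered.size : Int)

-- ===== PRECONDITION & SPEC =====
-- Pre_ excludes exactly the inputs on which the Python raises IndexError: the empty grid
-- (len(grid[0])) and grids with a row shorter than row 0 (grid[i][j]); B raises there too.
def Pre_simulate_life_game (grid : List (List String)) (K : Int) : Prop :=
  grid ≠ [] ∧ ∀ row ∈ grid, grid.headI.length ≤ row.length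
instance (grid : List (List String)) (K : Int) : Decidable (Pre_simulate_life_game grid K) := by
  unfold Pre_simulate_life_game; infer_instance

def pvWitness_simulate_life_game : List (List String) × Int := ([["o", "."], [".", "o"]], 1)

def Spec_simulate_life_game (grid : List (List String)) (K : Int) (out : Int) : Prop := out = simulate_life_game_alt grid K
instance (grid : List (List String)) (K : Int) (out : Int) : Decidable (Spec_simulate_life_game grid K out) := by unfold Spec_simulate_life_game; infer_instance

-- ===== CLAIM (what is proved, stated in full; the proofs are below) =====
def Claim_equal_simulate_life_game : Prop := ∀ (grid : List (List String)) (K : Int), Dom_simulate_life_game grid K → Pre_simulate_life_game grid K → Spec_simulate_life_game grid K (simulate_life_game grid K)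

-- ===== LEMMAS AND PROOFS =====

-- Manhattan distance and balls around a finite source list
def pvMdist (p s : Int × Int) : Int :=
  ((p.1 - s.1).natAbs : Int) + ((p.2 - s.2).natAbs : Int)

def pvBall (S : List (Int × Int)) (r : Int) (p : Int × Int) : Prop :=
  ∃ s ∈ S, pvMdist p s ≤ r

lemma pvMdist_self (p : Int × Int) : pvMdist p p = 0 := by
  simp [pvMdist]

lemma pvMdist_eq_zero {p s : Int × Int} (h : pvMdist p s ≤ 0) : p = s := by
  rcases p with ⟨a, b⟩; rcases s with ⟨c, d⟩
  simp only [pvMdist] at h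
  simp only [Prod.mk.injEq]
  omega

lemma pvMdist_triangle (p y s : Int × Int) : pvMdist p s ≤ pvMdist p y + pvMdist y s := by
  rcases p with ⟨a, b⟩; rcases y with ⟨e, f⟩; rcases s with ⟨c, d⟩
  simp only [pvMdist]
  omega

lemma pvMdist_step {p s : Int × Int} (h : 1 ≤ pvMdist p s) :
    ∃ y, pvMdist p y = 1 ∧ pvMdist y s = pvMdist p s - 1 := by
  rcases p with ⟨a, b⟩; rcases s with ⟨c, d⟩
  simp only [pvMdist] at h ⊢
  by_cases h1 : a < c
  · exact ⟨(a + 1, b), by omega, by omega⟩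
  by_cases h2 : c < a
  · exact ⟨(a - 1, b), by omega, by omega⟩
  by_cases h3 : b < d
  · exact ⟨(a, b + 1), by omega, by omega⟩
  · exact ⟨(a, b - 1), by omega, by omega⟩

lemma pvMdist_one_iff (p x : Int × Int) :
    pvMdist p x = 1 ↔
      (p = (x.1 + -1, x.2 + 0) ∨ p = (x.1 + 0, x.2 + 1) ∨
       p = (x.1 + 1, x.2 + 0) ∨ p = (x.1 + 0, x.2 + -1)) := by
  rcases p with ⟨a, b⟩; rcases x with ⟨c, d⟩
  simp only [pvMdist, Prod.mk.injEq]
  omega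

lemma pvBall_mono {S : List (Int × Int)} {r r' : Int} (h : r ≤ r') {p : Int × Int}
    (hb : pvBall S r p) : pvBall S r' p := by
  obtain ⟨s, hs, hd⟩ := hb
  exact ⟨s, hs, le_trans hd h⟩

-- generic fold helpers -------------------------------------------------------

lemma pvFoldl_pres {σ β : Type} (P : σ → Prop) (f : σ → β → σ)
    (h : ∀ s x, P s → P (f s x)) :
    ∀ (L : List β) (s : σ), P s → P (L.foldl f s) := by
  intro L
  induction L with
  | nil => intro s hs; exact hs
  | cons x t ih => intro s hs; exact ih _ (h s x hs)

lemma pvMem_foldl_union {σ β α : Type} (M : σ → α → Prop) (f : σ → β → σ) (G : β → α → Prop)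
    (hf : ∀ s x p, M (f s x) p ↔ M s p ∨ G x p) :
    ∀ (L : List β) (s : σ) (p : α),
      M (L.foldl f s) p ↔ M s p ∨ ∃ x ∈ L, G x p := by
  intro L
  induction L with
  | nil => intro s p; simp
  | cons x t ih =>
    intro s p
    rw [List.foldl_cons, ih, hf]
    constructor
    · rintro ((h | h) | ⟨y, hy, hG⟩)
      · exact Or.inl h
      · exact Or.inr ⟨x, List.mem_cons_self, h⟩
      · exact Or.inr ⟨y, List.mem_cons_of_mem _ hy, hG⟩
    · rintro (h | ⟨y, hy, hG⟩)
      · exact Or.inl (Or.inl h)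
      · rcases List.mem_cons.mp hy with rfl | hy
        · exact Or.inl (Or.inr hG)
        · exact Or.inr ⟨y, hy, hG⟩

-- "appended to q ⇔ newly added to found", compositionally through a fold
def pvQExtP (st st' : Std.HashSet (Int × Int) × List (Int × Int)) : Prop :=
  (∀ p, p ∈ st.1 → p ∈ st'.1) ∧
  ∃ δ, st'.2 = st.2 ++ δ ∧ ∀ p, p ∈ δ ↔ p ∈ st'.1 ∧ p ∉ st.1

lemma pvQExtP_rfl (st : Std.HashSet (Int × Int) × List (Int × Int)) : pvQExtP st st := by
  refine ⟨fun p hp => hp, [], by simp, fun p => ?_⟩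
  simp only [List.not_mem_nil, false_iff]
  rintro ⟨h1, h2⟩
  exact h2 h1

lemma pvQExtP_trans {s1 s2 s3 : Std.HashSet (Int × Int) × List (Int × Int)}
    (h12 : pvQExtP s1 s2) (h23 : pvQExtP s2 s3) : pvQExtP s1 s3 := by
  obtain ⟨m12, δ1, e1, q1⟩ := h12
  obtain ⟨m23, δ2, e2, q2⟩ := h23
  refine ⟨fun p hp => m23 p (m12 p hp), δ1 ++ δ2, by rw [e2, e1, List.append_assoc], fun p => ?_⟩
  rw [List.mem_append, q1 p, q2 p]
  constructor
  · rintro (⟨h1, h2⟩ | ⟨h1, h2⟩)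
    · exact ⟨m23 p h1, h2⟩
    · exact ⟨h1, fun hc => h2 (m12 p hc)⟩
  · rintro ⟨h1, h2⟩
    by_cases hm : p ∈ s2.1
    · exact Or.inl ⟨hm, h2⟩
    · exact Or.inr ⟨h1, hm⟩

lemma pvQExt_foldl {β : Type}
    (f : Std.HashSet (Int × Int) × List (Int × Int) → β → Std.HashSet (Int × Int) × List (Int × Int))
    (hf : ∀ st x, pvQExtP st (f st x)) :
    ∀ (L : List β) st, pvQExtP st (L.foldl f st) := by
  intro L
  induction L with
  | nil => intro st; exact pvQExtP_rfl st
  | cons x t ih => intro st; exact pvQExtP_trans (hf st x) (ih (f st x))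

-- A-side step/process facts --------------------------------------------------

lemma mem_pvAStep (st : Std.HashSet (Int × Int) × List (Int × Int)) (x p : Int × Int) :
    p ∈ (pvAStep st x).1 ↔ p ∈ st.1 ∨ p = x := by
  unfold pvAStep
  split_ifs with h
  · rw [show (st.1.insert x, st.2 ++ [x]).1 = st.1.insert x from rfl, Std.HashSet.mem_insert]
    simp only [beq_iff_eq]
    constructor
    · rintro (rfl | hp)
      · exact Or.inr rfl
      · exact Or.inl hp
    · rintro (hp | rfl)
      · exact Or.inr hp
      · exact Or.inl rfl
  · simp only [Bool.not_eq_false] at h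
    have hx : x ∈ st.1 := Std.HashSet.contains_iff_mem.mp h
    constructor
    · exact Or.inl
    · rintro (h' | rfl)
      · exact h'
      · exact hx

lemma qext_pvAStep (st : Std.HashSet (Int × Int) × List (Int × Int)) (x : Int × Int) :
    pvQExtP st (pvAStep st x) := by
  unfold pvAStep
  split_ifs with h
  · have hx : x ∉ st.1 := fun hm => by
      rw [Std.HashSet.contains_iff_mem.mpr hm] at h
      simp at h
    refine ⟨fun p hp => by
        rw [show (st.1.insert x, st.2 ++ [x]).1 = st.1.insert x from rfl,
          Std.HashSet.mem_insert]
        exact Or.inr hp,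
      [x], rfl, fun p => ?_⟩
    rw [show (st.1.insert x, st.2 ++ [x]).1 = st.1.insert x from rfl, Std.HashSet.mem_insert]
    simp only [List.mem_singleton, beq_iff_eq]
    constructor
    · rintro rfl
      exact ⟨Or.inl rfl, hx⟩
    · rintro ⟨rfl | hp, hn⟩
      · rfl
      · exact absurd hp hn
  · exact pvQExtP_rfl st

lemma mem_pvAProcess (st : Std.HashSet (Int × Int) × List (Int × Int)) (node p : Int × Int) :
    p ∈ (pvAProcess st node).1 ↔ p ∈ st.1 ∨ pvMdist p node = 1 := by
  have hrng : PySem.List.pyRange 0 4 1 = [0, 1, 2, 3] := by decide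
  unfold pvAProcess
  rw [hrng]
  simp only [List.foldl_cons, List.foldl_nil]
  have e0 : (PySem.List.pyGet? dRow 0).getD 0 = (-1 : Int) := rfl
  have e1 : (PySem.List.pyGet? dRow 1).getD 0 = (0 : Int) := rfl
  have e2 : (PySem.List.pyGet? dRow 2).getD 0 = (1 : Int) := rfl
  have e3 : (PySem.List.pyGet? dRow 3).getD 0 = (0 : Int) := rfl
  have f0 : (PySem.List.pyGet? dCol 0).getD 0 = (0 : Int) := rfl
  have f1 : (PySem.List.pyGet? dCol 1).getD 0 = (1 : Int) := rfl
  have f2 : (PySem.List.pyGet? dCol 2).getD 0 = (0 : Int) := rfl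
  have f3 : (PySem.List.pyGet? dCol 3).getD 0 = (-1 : Int) := rfl
  rw [e0, e1, e2, e3, f0, f1, f2, f3]
  rw [mem_pvAStep, mem_pvAStep, mem_pvAStep, mem_pvAStep, pvMdist_one_iff]
  tauto

lemma qext_pvAProcess (st : Std.HashSet (Int × Int) × List (Int × Int)) (node : Int × Int) :
    pvQExtP st (pvAProcess st node) := by
  unfold pvAProcess
  exact pvQExt_foldl _ (fun st x => qext_pvAStep st _) _ st

-- one BFS round --------------------------------------------------------------

lemma pvRound_spec (found : Std.HashSet (Int × Int)) (q : List (Int × Int)) :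
    (∀ p, p ∈ (q.foldl pvAProcess (found, ([] : List (Int × Int)))).1 ↔
      p ∈ found ∨ ∃ x ∈ q, pvMdist p x = 1) ∧
    (∀ p, p ∈ (q.foldl pvAProcess (found, ([] : List (Int × Int)))).2 ↔
      p ∈ (q.foldl pvAProcess (found, ([] : List (Int × Int)))).1 ∧ p ∉ found) := by
  constructor
  · exact fun p =>
      pvMem_foldl_union (fun st p => p ∈ st.1) pvAProcess (fun x p => pvMdist p x = 1)
        (fun s x p => mem_pvAProcess s x p) q _ p
  · obtain ⟨-, δ, e, hq⟩ := pvQExt_foldl pvAProcess (fun st x => qext_pvAProcess st x) q (found, [])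
    intro p
    rw [e]
    simpa using hq p

-- ball stabilisation and expansion ------------------------------------------

lemma pvBall_succ_cover {S : List (Int × Int)} {t : Int} (ht : 0 ≤ t) {p : Int × Int}
    (h1 : pvBall S (t + 1) p) (h2 : ¬ pvBall S t p) :
    ∃ y, pvMdist p y = 1 ∧ pvBall S t y ∧ ¬ pvBall S (t - 1) y := by
  obtain ⟨s, hs, hle⟩ := h1
  have hgt : ¬ pvMdist p s ≤ t := fun hc => h2 ⟨s, hs, hc⟩
  have h1d : 1 ≤ pvMdist p s := by omega
  obtain ⟨y, hy1, hy2⟩ := pvMdist_step h1d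
  refine ⟨y, hy1, ⟨s, hs, by omega⟩, ?_⟩
  rintro ⟨s', hs', hd'⟩
  exact h2 ⟨s', hs', by have := pvMdist_triangle p y s'; omega⟩

lemma pvBall_succ_sub {S : List (Int × Int)} {t : Int} (ht : 0 ≤ t)
    (hstep : ∀ p, pvBall S t p → pvBall S (t - 1) p) :
    ∀ (j : Nat) (p : Int × Int), pvBall S (t + j + 1) p → pvBall S (t + j) p := by
  intro j
  induction j with
  | zero =>
    intro p hb
    obtain ⟨s, hs, hle⟩ := hb
    by_cases hc : pvMdist p s ≤ t
    · exact ⟨s, hs, by push_cast; omega⟩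
    · have h1d : 1 ≤ pvMdist p s := by omega
      obtain ⟨y, hy1, hy2⟩ := pvMdist_step h1d
      have hby : pvBall S t y := ⟨s, hs, by push_cast at hle; omega⟩
      obtain ⟨s', hs', hd'⟩ := hstep y hby
      exact ⟨s', hs', by have := pvMdist_triangle p y s'; push_cast; omega⟩
  | succ j ih =>
    intro p hb
    obtain ⟨s, hs, hle⟩ := hb
    by_cases hc : pvMdist p s ≤ t + (j + 1 : Nat)
    · exact ⟨s, hs, hc⟩
    · have h1d : 1 ≤ pvMdist p s := by push_cast at hc ⊢; omega
      obtain ⟨y, hy1, hy2⟩ := pvMdist_step h1d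
      have hby : pvBall S (t + j + 1) y := ⟨s, hs, by push_cast at hle hc ⊢; omega⟩
      obtain ⟨s', hs', hd'⟩ := ih y hby
      exact ⟨s', hs', by have := pvMdist_triangle p y s'; push_cast at hd' ⊢; omega⟩

lemma pvBall_stable {S : List (Int × Int)} {t : Int} (ht : 0 ≤ t)
    (hstep : ∀ p, pvBall S t p → pvBall S (t - 1) p) :
    ∀ (j : Nat) (p : Int × Int), pvBall S (t + j) p → pvBall S t p := by
  intro j
  induction j with
  | zero => intro p hb; obtain ⟨s, hs, hle⟩ := hb; exact ⟨s, hs, by push_cast at hle; omega⟩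
  | succ j ih =>
    intro p hb
    apply ih
    apply pvBall_succ_sub ht hstep j
    obtain ⟨s, hs, hle⟩ := hb
    exact ⟨s, hs, by push_cast at hle ⊢; omega⟩

-- the BFS loop computes the ball of radius t + fuel --------------------------

lemma pvALoop_spec (S : List (Int × Int)) :
    ∀ (fuel : Nat) (t : Int) (found : Std.HashSet (Int × Int)) (q : List (Int × Int)),
      0 ≤ t →
      (∀ p, p ∈ found ↔ pvBall S t p) →
      (∀ p, p ∈ q ↔ pvBall S t p ∧ ¬ pvBall S (t - 1) p) →
      (∀ p, p ∈ pvALoop fuel found q ↔ pvBall S (t + fuel) p) := by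
  intro fuel
  induction fuel with
  | zero =>
    intro t found q ht hf _ p
    rw [show pvALoop 0 found q = found from rfl]
    simpa using hf p
  | succ n ih =>
    intro t found q ht hf hq
    by_cases hq0 : q = []
    · rw [show pvALoop (n + 1) found q = if q = [] then found else
          pvALoop n (q.foldl pvAProcess (found, [])).1 (q.foldl pvAProcess (found, [])).2
          from rfl, if_pos hq0]
      have hstep : ∀ p, pvBall S t p → pvBall S (t - 1) p := by
        intro p hb
        by_contra hnb
        have : p ∈ q := (hq p).mpr ⟨hb, hnb⟩
        simp [hq0] at this
      intro p
      refine ⟨fun hp => pvBall_mono (by push_cast; omega) ((hf p).mp hp), fun hp => ?_⟩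
      apply (hf p).mpr
      apply pvBall_stable ht hstep (n + 1)
      obtain ⟨s, hs, hle⟩ := hp
      exact ⟨s, hs, by push_cast at hle ⊢; omega⟩
    · rw [show pvALoop (n + 1) found q = if q = [] then found else
          pvALoop n (q.foldl pvAProcess (found, [])).1 (q.foldl pvAProcess (found, [])).2
          from rfl, if_neg hq0]
      obtain ⟨hmem', hq'⟩ := pvRound_spec found q
      have hf' : ∀ p, p ∈ (q.foldl pvAProcess (found, ([] : List (Int × Int)))).1 ↔
          pvBall S (t + 1) p := by
        intro p
        rw [hmem' p]
        constructor
        · rintro (hp | ⟨x, hx, hd⟩)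
          · exact pvBall_mono (by omega) ((hf p).mp hp)
          · obtain ⟨s, hs, hle⟩ := ((hq x).mp hx).1
            exact ⟨s, hs, by have := pvMdist_triangle p x s; omega⟩
        · intro hb
          by_cases hbt : pvBall S t p
          · exact Or.inl ((hf p).mpr hbt)
          · obtain ⟨y, hy1, hy2, hy3⟩ := pvBall_succ_cover ht hb hbt
            exact Or.inr ⟨y, (hq y).mpr ⟨hy2, hy3⟩, hy1⟩
      have hq2 : ∀ p, p ∈ (q.foldl pvAProcess (found, ([] : List (Int × Int)))).2 ↔
          pvBall S (t + 1) p ∧ ¬ pvBall S (t + 1 - 1) p := by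
        intro p
        rw [hq' p, hf' p]
        have ht1 : t + 1 - 1 = t := by omega
        rw [ht1]
        constructor
        · rintro ⟨hb, hnf⟩; exact ⟨hb, fun hbt => hnf ((hf p).mpr hbt)⟩
        · rintro ⟨hb, hnt⟩; exact ⟨hb, fun hfp => hnt ((hf p).mp hfp)⟩
      intro p
      rw [ih (t + 1) _ _ (by omega) hf' hq2 p]
      have : t + 1 + (n : Int) = t + ((n + 1 : Nat) : Int) := by push_cast; ring
      rw [this]

-- init fold facts -------------------------------------------------------------

lemma pvInit_spec (grid : List (List String)) (n m : Int) (p : Int × Int) :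
    p ∈ ((PySem.List.pyRange 0 n 1).foldl
      (fun st i =>
        (PySem.List.pyRange 0 m 1).foldl
          (fun st j =>
            if pvCell grid i j = "o" then
              (st.1.insert (i + 1500, j + 1500), st.2 ++ [(i + 1500, j + 1500)])
            else st) st)
      ((Std.HashSet.emptyWithCapacity : Std.HashSet (Int × Int)), ([] : List (Int × Int)))).1 ↔
    p ∈ ((PySem.List.pyRange 0 n 1).foldl
      (fun st i =>
        (PySem.List.pyRange 0 m 1).foldl
          (fun st j =>
            if pvCell grid i j = "o" then
              (st.1.insert (i + 1500, j + 1500), st.2 ++ [(i + 1500, j + 1500)])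
            else st) st)
      ((Std.HashSet.emptyWithCapacity : Std.HashSet (Int × Int)), ([] : List (Int × Int)))).2 := by
  have hinner : ∀ (i : Int) (st : Std.HashSet (Int × Int) × List (Int × Int)),
      (∀ p, p ∈ st.1 ↔ p ∈ st.2) →
      ∀ p, p ∈ ((PySem.List.pyRange 0 m 1).foldl
        (fun st j =>
          if pvCell grid i j = "o" then
            (st.1.insert (i + 1500, j + 1500), st.2 ++ [(i + 1500, j + 1500)])
          else st) st).1 ↔
      p ∈ ((PySem.List.pyRange 0 m 1).foldl
        (fun st j =>
          if pvCell grid i j = "o" then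
            (st.1.insert (i + 1500, j + 1500), st.2 ++ [(i + 1500, j + 1500)])
          else st) st).2 := by
    intro i
    refine pvFoldl_pres
      (fun (st : Std.HashSet (Int × Int) × List (Int × Int)) => ∀ p, p ∈ st.1 ↔ p ∈ st.2)
      _ ?_ _
    intro st j hst p
    by_cases hc : pvCell grid i j = "o"
    · simp only [hc, if_pos]
      rw [Std.HashSet.mem_insert]
      simp only [beq_iff_eq, List.mem_append, List.mem_singleton, hst p]
      tauto
    · simp only [hc, ite_false]
      exact hst p
  refine pvFoldl_pres
    (fun (st : Std.HashSet (Int × Int) × List (Int × Int)) => ∀ p, p ∈ st.1 ↔ p ∈ st.2)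
    _ (fun st i hst => hinner i st hst) _ _ ?_ p
  intro p
  simp [Std.HashSet.not_mem_emptyWithCapacity]

lemma pvInit_mem (grid : List (List String)) (n m : Int) (p : Int × Int) :
    p ∈ ((PySem.List.pyRange 0 n 1).foldl
      (fun st i =>
        (PySem.List.pyRange 0 m 1).foldl
          (fun st j =>
            if pvCell grid i j = "o" then
              (st.1.insert (i + 1500, j + 1500), st.2 ++ [(i + 1500, j + 1500)])
            else st) st)
      ((Std.HashSet.emptyWithCapacity : Std.HashSet (Int × Int)), ([] : List (Int × Int)))).1 ↔
    ∃ i ∈ PySem.List.pyRange 0 n 1, ∃ j ∈ PySem.List.pyRange 0 m 1,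
      pvCell grid i j = "o" ∧ p = (i + 1500, j + 1500) := by
  have hinner : ∀ (i : Int) (st : Std.HashSet (Int × Int) × List (Int × Int)) (p : Int × Int),
      p ∈ ((PySem.List.pyRange 0 m 1).foldl
        (fun st j =>
          if pvCell grid i j = "o" then
            (st.1.insert (i + 1500, j + 1500), st.2 ++ [(i + 1500, j + 1500)])
          else st) st).1 ↔
      p ∈ st.1 ∨ ∃ j ∈ PySem.List.pyRange 0 m 1,
        pvCell grid i j = "o" ∧ p = (i + 1500, j + 1500) := by
    intro i
    refine pvMem_foldl_union
      (fun (st : Std.HashSet (Int × Int) × List (Int × Int)) p => p ∈ st.1) _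
      (fun j p => pvCell grid i j = "o" ∧ p = (i + 1500, j + 1500)) ?_ _
    intro st j p
    by_cases hc : pvCell grid i j = "o"
    · simp only [hc, if_pos]
      rw [Std.HashSet.mem_insert]
      simp only [beq_iff_eq, true_and]
      tauto
    · simp [hc]
  rw [pvMem_foldl_union
    (fun (st : Std.HashSet (Int × Int) × List (Int × Int)) p => p ∈ st.1) _
    (fun i p => ∃ j ∈ PySem.List.pyRange 0 m 1,
      pvCell grid i j = "o" ∧ p = (i + 1500, j + 1500))
    (fun st i p => hinner i st p) _ _ p]
  simp [Std.HashSet.not_mem_emptyWithCapacity]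

-- B-side membership ------------------------------------------------------------

lemma pvDiamond_mem (R i j : Int) (hR : 0 ≤ R) (p : Int × Int) :
    (∃ dr ∈ PySem.List.pyRange (-R) (R + 1) 1,
      ∃ dc ∈ PySem.List.pyRange (-(R - |dr|)) ((R - |dr|) + 1) 1, p = (i + dr, j + dc)) ↔
    pvMdist p (i, j) ≤ R := by
  obtain ⟨a, b⟩ := p
  constructor
  · rintro ⟨dr, hdr, dc, hdc, hp⟩
    rw [PySem.List.mem_pyRange_one] at hdr hdc
    rw [Int.abs_eq_natAbs] at hdc
    simp only [Prod.mk.injEq] at hp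
    obtain ⟨ha, hb⟩ := hp
    simp only [pvMdist]
    omega
  · intro h
    refine ⟨a - i, ?_, b - j, ?_, ?_⟩
    · rw [PySem.List.mem_pyRange_one]
      simp only [pvMdist] at h
      omega
    · rw [PySem.List.mem_pyRange_one, Int.abs_eq_natAbs]
      simp only [pvMdist] at h
      omega
    · simp only [Prod.mk.injEq]
      omega

lemma pvCovered_mem (grid : List (List String)) (n m R : Int) (hR : 0 ≤ R) (p : Int × Int) :
    p ∈ ((PySem.List.pyRange 0 n 1).foldl
      (fun cov i =>
        (PySem.List.pyRange 0 m 1).foldl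
          (fun cov j =>
            if pvCellB grid i j = "o" then
              (PySem.List.pyRange (-R) (R + 1) 1).foldl
                (fun cov dr =>
                  (PySem.List.pyRange (-(R - |dr|)) ((R - |dr|) + 1) 1).foldl
                    (fun cov dc => cov.insert (i + dr, j + dc)) cov) cov
            else cov) cov)
      (Std.HashSet.emptyWithCapacity : Std.HashSet (Int × Int))) ↔
    ∃ i ∈ PySem.List.pyRange 0 n 1, ∃ j ∈ PySem.List.pyRange 0 m 1,
      pvCellB grid i j = "o" ∧ pvMdist p (i, j) ≤ R := by
  have hdc : ∀ (i j dr : Int) (cov : Std.HashSet (Int × Int)) (p : Int × Int),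
      p ∈ (PySem.List.pyRange (-(R - |dr|)) ((R - |dr|) + 1) 1).foldl
        (fun cov dc => cov.insert (i + dr, j + dc)) cov ↔
      p ∈ cov ∨ ∃ dc ∈ PySem.List.pyRange (-(R - |dr|)) ((R - |dr|) + 1) 1,
        p = (i + dr, j + dc) := by
    intro i j dr
    refine pvMem_foldl_union (fun (cov : Std.HashSet (Int × Int)) p => p ∈ cov) _
      (fun dc p => p = (i + dr, j + dc)) ?_ _
    intro cov dc p
    show p ∈ cov.insert (i + dr, j + dc) ↔ p ∈ cov ∨ p = (i + dr, j + dc)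
    rw [Std.HashSet.mem_insert]
    simp only [beq_iff_eq]
    tauto
  have hdr : ∀ (i j : Int) (cov : Std.HashSet (Int × Int)) (p : Int × Int),
      p ∈ (PySem.List.pyRange (-R) (R + 1) 1).foldl
        (fun cov dr =>
          (PySem.List.pyRange (-(R - |dr|)) ((R - |dr|) + 1) 1).foldl
            (fun cov dc => cov.insert (i + dr, j + dc)) cov) cov ↔
      p ∈ cov ∨ pvMdist p (i, j) ≤ R := by
    intro i j cov p
    rw [pvMem_foldl_union (fun (cov : Std.HashSet (Int × Int)) p => p ∈ cov) _
      (fun dr p => ∃ dc ∈ PySem.List.pyRange (-(R - |dr|)) ((R - |dr|) + 1) 1,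
        p = (i + dr, j + dc))
      (fun cov dr p => hdc i j dr cov p) _ _ p]
    rw [show (∃ dr ∈ PySem.List.pyRange (-R) (R + 1) 1,
      ∃ dc ∈ PySem.List.pyRange (-(R - |dr|)) ((R - |dr|) + 1) 1,
        p = (i + dr, j + dc)) ↔ pvMdist p (i, j) ≤ R from pvDiamond_mem R i j hR p]
  have hj : ∀ (i : Int) (cov : Std.HashSet (Int × Int)) (p : Int × Int),
      p ∈ (PySem.List.pyRange 0 m 1).foldl
        (fun cov j =>
          if pvCellB grid i j = "o" then
            (PySem.List.pyRange (-R) (R + 1) 1).foldl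
              (fun cov dr =>
                (PySem.List.pyRange (-(R - |dr|)) ((R - |dr|) + 1) 1).foldl
                  (fun cov dc => cov.insert (i + dr, j + dc)) cov) cov
          else cov) cov ↔
      p ∈ cov ∨ ∃ j ∈ PySem.List.pyRange 0 m 1,
        pvCellB grid i j = "o" ∧ pvMdist p (i, j) ≤ R := by
    intro i
    refine pvMem_foldl_union (fun (cov : Std.HashSet (Int × Int)) p => p ∈ cov) _
      (fun j p => pvCellB grid i j = "o" ∧ pvMdist p (i, j) ≤ R) ?_ _
    intro cov j p
    by_cases hc : pvCellB grid i j = "o"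
    · simp only [hc, if_pos]
      rw [hdr i j cov p]
      simp
    · simp [hc]
  rw [pvMem_foldl_union (fun (cov : Std.HashSet (Int × Int)) p => p ∈ cov) _
    (fun i p => ∃ j ∈ PySem.List.pyRange 0 m 1,
      pvCellB grid i j = "o" ∧ pvMdist p (i, j) ≤ R)
    (fun cov i p => hj i cov p) _ _ p]
  simp [Std.HashSet.not_mem_emptyWithCapacity]

-- assembling both counts ------------------------------------------------------

lemma pvHashNodup (s : Std.HashSet (Int × Int)) : s.toList.Nodup := by
  have h := Std.HashSet.distinct_toList (m := s)
  refine h.imp ?_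
  intro a b hab
  intro he
  rw [he] at hab
  simp at hab

lemma pvMdist_shift (q : Int × Int) (i j : Int) :
    pvMdist (q.1 + 1500, q.2 + 1500) (i + 1500, j + 1500) = pvMdist q (i, j) := by
  simp only [pvMdist]
  omega

lemma pvMain (grid : List (List String)) (K : Int) (n m : Int) :
    ((pvALoop K.toNat
      ((PySem.List.pyRange 0 n 1).foldl
        (fun st i =>
          (PySem.List.pyRange 0 m 1).foldl
            (fun st j =>
              if pvCell grid i j = "o" then
                (st.1.insert (i + 1500, j + 1500), st.2 ++ [(i + 1500, j + 1500)])
              else st) st)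
        ((Std.HashSet.emptyWithCapacity : Std.HashSet (Int × Int)), ([] : List (Int × Int)))).1
      ((PySem.List.pyRange 0 n 1).foldl
        (fun st i =>
          (PySem.List.pyRange 0 m 1).foldl
            (fun st j =>
              if pvCell grid i j = "o" then
                (st.1.insert (i + 1500, j + 1500), st.2 ++ [(i + 1500, j + 1500)])
              else st) st)
        ((Std.HashSet.emptyWithCapacity : Std.HashSet (Int × Int)), ([] : List (Int × Int)))).2).size : Int) =
    (((PySem.List.pyRange 0 n 1).foldl
      (fun cov i =>
        (PySem.List.pyRange 0 m 1).foldl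
          (fun cov j =>
            if pvCellB grid i j = "o" then
              (PySem.List.pyRange (-(if 0 < K then K else 0)) ((if 0 < K then K else 0) + 1) 1).foldl
                (fun cov dr =>
                  (PySem.List.pyRange (-((if 0 < K then K else 0) - |dr|))
                      (((if 0 < K then K else 0) - |dr|) + 1) 1).foldl
                    (fun cov dc => cov.insert (i + dr, j + dc)) cov) cov
            else cov) cov)
      (Std.HashSet.emptyWithCapacity : Std.HashSet (Int × Int))).size : Int) := by
  set I := ((PySem.List.pyRange 0 n 1).foldl
      (fun st i =>
        (PySem.List.pyRange 0 m 1).foldl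
          (fun st j =>
            if pvCell grid i j = "o" then
              (st.1.insert (i + 1500, j + 1500), st.2 ++ [(i + 1500, j + 1500)])
            else st) st)
      ((Std.HashSet.emptyWithCapacity : Std.HashSet (Int × Int)), ([] : List (Int × Int)))) with hI
  set CB := ((PySem.List.pyRange 0 n 1).foldl
      (fun cov i =>
        (PySem.List.pyRange 0 m 1).foldl
          (fun cov j =>
            if pvCellB grid i j = "o" then
              (PySem.List.pyRange (-(if 0 < K then K else 0)) ((if 0 < K then K else 0) + 1) 1).foldl
                (fun cov dr =>
                  (PySem.List.pyRange (-((if 0 < K then K else 0) - |dr|))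
                      (((if 0 < K then K else 0) - |dr|) + 1) 1).foldl
                    (fun cov dc => cov.insert (i + dr, j + dc)) cov) cov
            else cov) cov)
      (Std.HashSet.emptyWithCapacity : Std.HashSet (Int × Int))) with hCB
  have hR0 : (0 : Int) ≤ (if 0 < K then K else 0) := by split_ifs <;> omega
  have hRK : (0 : Int) + (K.toNat : Int) = (if 0 < K then K else 0) := by
    split_ifs with h <;> omega
  have hinit := pvInit_spec grid n m
  rw [← hI] at hinit
  have hf0 : ∀ p, p ∈ I.1 ↔ pvBall I.2 0 p := by
    intro p
    constructor
    · intro hp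
      exact ⟨p, (hinit p).mp hp, by simp [pvMdist_self]⟩
    · rintro ⟨s, hs, hd⟩
      exact pvMdist_eq_zero hd ▸ (hinit s).mpr hs
  have hq0 : ∀ p, p ∈ I.2 ↔ pvBall I.2 0 p ∧ ¬ pvBall I.2 (0 - 1) p := by
    intro p
    constructor
    · intro hp
      refine ⟨⟨p, hp, by simp [pvMdist_self]⟩, ?_⟩
      rintro ⟨s, hs, hd⟩
      simp only [pvMdist] at hd
      omega
    · rintro ⟨⟨s, hs, hd⟩, -⟩
      exact pvMdist_eq_zero hd ▸ hs
  have hmemA := pvALoop_spec I.2 K.toNat 0 I.1 I.2 le_rfl hf0 hq0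
  have memI := pvInit_mem grid n m
  rw [← hI] at memI
  have memA : ∀ p, p ∈ pvALoop K.toNat I.1 I.2 ↔
      ∃ i ∈ PySem.List.pyRange 0 n 1, ∃ j ∈ PySem.List.pyRange 0 m 1,
        pvCell grid i j = "o" ∧ pvMdist p (i + 1500, j + 1500) ≤ (if 0 < K then K else 0) := by
    intro p
    rw [hmemA p]
    constructor
    · rintro ⟨s, hs, hd⟩
      obtain ⟨i, hi, j, hj, hc, rfl⟩ := (memI s).mp ((hinit s).mpr hs)
      exact ⟨i, hi, j, hj, hc, by omega⟩
    · rintro ⟨i, hi, j, hj, hc, hd⟩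
      exact ⟨(i + 1500, j + 1500), (hinit _).mp ((memI _).mpr ⟨i, hi, j, hj, hc, rfl⟩), by omega⟩
  have memB := pvCovered_mem grid n m (if 0 < K then K else 0) hR0
  rw [← hCB] at memB
  have hinj : Function.Injective (fun (p : Int × Int) => (p.1 + 1500, p.2 + 1500)) := by
    intro a b h
    obtain ⟨a1, a2⟩ := a; obtain ⟨b1, b2⟩ := b
    simp only [Prod.mk.injEq] at h ⊢
    omega
  have hmap := (pvHashNodup CB).map hinj
  have hext : ∀ p, p ∈ CB.toList.map (fun (p : Int × Int) => (p.1 + 1500, p.2 + 1500)) ↔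
      p ∈ (pvALoop K.toNat I.1 I.2).toList := by
    intro p
    rw [List.mem_map, Std.HashSet.mem_toList]
    constructor
    · rintro ⟨q, hq, rfl⟩
      rw [Std.HashSet.mem_toList] at hq
      obtain ⟨i, hi, j, hj, hc, hd⟩ := (memB q).mp hq
      refine (memA _).mpr ⟨i, hi, j, hj, hc, ?_⟩
      rw [pvMdist_shift q i j]
      exact hd
    · intro hp
      obtain ⟨i, hi, j, hj, hc, hd⟩ := (memA p).mp hp
      refine ⟨(p.1 - 1500, p.2 - 1500), ?_, by simp⟩
      rw [Std.HashSet.mem_toList]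
      refine (memB _).mpr ⟨i, hi, j, hj, hc, ?_⟩
      have hsh := pvMdist_shift (p.1 - 1500, p.2 - 1500) i j
      simp only at hsh
      rw [← hsh]
      simpa using hd
  have hperm := (List.perm_ext_iff_of_nodup hmap (pvHashNodup _)).mpr hext
  have hlen := hperm.length_eq
  rw [List.length_map, Std.HashSet.length_toList, Std.HashSet.length_toList] at hlen
  omega

-- ===== VERDICT (by name: the statement is the Claim_ definition above) =====
theorem simulate_life_game_spec : Claim_equal_simulate_life_game := by
  intro grid K _ _
  unfold Spec_simulate_life_game
  unfold simulate_life_game simulate_life_game_alt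
  exact pvMain grid K grid.length (((PySem.List.pyGet? grid 0).getD []).length : Int)
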